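-- pv_equiv track=rewrite | github.com/fuzzklang/flimmering | python_scripts/misc.py | check_and_adjust_list_length
-- ===== SOURCE A (Python) =====
-- def check_and_adjust_list_length(ref_list, adj_list):
--     """
--     Takes two lists as parameter.
--     Returns only the adjusted list, since it is assumed that the reference
--     list remains unmodified.
--     Returns an error if receiving any empty lists.
--
--     Adjusts the length of the adjustment-list (adj_list) so that it's length
--     is the same as the length of the reference-list (ref_list).
--     If adj_list is shorter than ref_list, adj_list's values are "cycled through",
--     repeated until it reaches the same length as ref_list.
--     (e.g:
--     ref_list = ["r", "g", "b", "r", "g", "b"]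
--     adj_list = [1, 2]
--     -->
--     adj_list = [1, 2, 1, 2, 1, 2])
--     """
--     assert len(ref_list) > 0 and len(adj_list) > 0, "\n\nEmpty lists received, returning error.\n[In function 'check_and_adjust_list_length' in module 'misc']\n"
--     if len(ref_list) < len(adj_list):
--         adj_list = adj_list[0:len(ref_list)]
--     else:
--         idx = 0
--         while len(ref_list) > len(adj_list):
--             adj_list.append(adj_list[idx])
--             idx += 1
--     return adj_list
-- ===== SOURCE B (Python) =====
-- def check_and_adjust_list_length(ref_list, adj_list):
--     assert len(ref_list) > 0 and len(adj_list) > 0, "\n\nEmpty lists received, returning error.\n[In function 'check_and_adjust_list_length' in module 'misc']\n"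
--     n, m = len(ref_list), len(adj_list)
--     if n < m:
--         return adj_list[0:n]
--     reps = -(-n // m)  # ceil(n / m)
--     adj_list[:] = (adj_list * reps)[:n]  # mutate in place, like A's append loop
--     return adj_list
-- ===== Notes on version B (the rewrite author's own statement) =====
-- stated objective: idiomatic
-- what changed: The incremental append-with-index cycling loop is replaced by a whole-sequence construction: repeat adj_list ceil(n/m) times with list multiplication, slice to n, and write it back in place via slice assignment so the caller observes the same mutation.
import Mathlib
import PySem

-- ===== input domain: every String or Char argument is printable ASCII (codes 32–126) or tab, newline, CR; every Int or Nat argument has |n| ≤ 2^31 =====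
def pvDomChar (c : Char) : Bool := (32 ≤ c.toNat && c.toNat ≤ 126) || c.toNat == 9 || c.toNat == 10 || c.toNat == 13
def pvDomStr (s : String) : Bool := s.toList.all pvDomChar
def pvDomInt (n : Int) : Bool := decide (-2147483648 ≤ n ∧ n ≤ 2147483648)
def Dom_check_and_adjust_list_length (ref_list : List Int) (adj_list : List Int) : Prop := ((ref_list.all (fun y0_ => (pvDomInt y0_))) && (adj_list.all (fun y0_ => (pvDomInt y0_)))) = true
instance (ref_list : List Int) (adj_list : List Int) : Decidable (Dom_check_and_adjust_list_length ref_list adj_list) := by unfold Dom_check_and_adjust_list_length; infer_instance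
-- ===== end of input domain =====

-- B replaces A's incremental append-with-index cycling loop by a repetition-and-slice
-- construction (adj_list * ceil(n/m), sliced to n), written back in place so the caller
-- observes the same mutation of adj_list as with A (objective: idiomatic).
-- Equivalence is about the RETURN value; both Pythons mutate adj_list identically in the cycle branch.

-- ===== PORT A =====
-- the while-loop: while len(ref_list) > len(adj_list): adj_list.append(adj_list[idx]); idx += 1
-- (the 'none' branch of pyGet? is unreachable while the loop runs: 0 ≤ idx < len(adj_list))
def pvLoopA (n : Nat) (adj : List Int) (idx : Nat) : List Int :=
  if _h : adj.length < n then
    match PySem.List.pyGet? adj (idx : Int) with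
    | some v => pvLoopA n (adj ++ [v]) (idx + 1)
    | none => adj
  else adj
termination_by n - adj.length
decreasing_by simp; omega

def check_and_adjust_list_length (ref_list : List Int) (adj_list : List Int) : List Int :=
  -- the assert: Pre_ excludes the inputs on which it raises AssertionError
  if 0 < ref_list.length ∧ 0 < adj_list.length then
    if ref_list.length < adj_list.length then
      PySem.List.slice adj_list (some 0) (some (ref_list.length : Int))
    else
      pvLoopA ref_list.length adj_list 0
  else []

-- ===== PORT B =====
def check_and_adjust_list_length_alt (ref_list : List Int) (adj_list : List Int) : List Int :=
  if 0 < ref_list.length ∧ 0 < adj_list.length then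
    let n : Nat := ref_list.length
    let m : Nat := adj_list.length
    if n < m then
      PySem.List.slice adj_list (some 0) (some (n : Int))
    else
      let reps : Int := -(PySem.Int.floordiv (-(n : Int)) (m : Int))
      PySem.List.slice (PySem.List.pyRepeat adj_list reps) none (some (n : Int))
  else []

-- ===== PRECONDITION & SPEC =====
-- Pre_ excludes exactly the inputs on which A's assert raises AssertionError (an empty list)
def Pre_check_and_adjust_list_length (ref_list : List Int) (adj_list : List Int) : Prop :=
  0 < ref_list.length ∧ 0 < adj_list.length
instance (ref_list : List Int) (adj_list : List Int) : Decidable (Pre_check_and_adjust_list_length ref_list adj_list) := by unfold Pre_check_and_adjust_list_length; infer_instance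
def pvWitness_check_and_adjust_list_length : List Int × List Int := ([1, 2, 3], [7, 8])

def Spec_check_and_adjust_list_length (ref_list : List Int) (adj_list : List Int) (out : List Int) : Prop := out = check_and_adjust_list_length_alt ref_list adj_list
instance (ref_list : List Int) (adj_list : List Int) (out : List Int) : Decidable (Spec_check_and_adjust_list_length ref_list adj_list out) := by unfold Spec_check_and_adjust_list_length; infer_instance

-- ===== CLAIM (what is proved, stated in full; the proofs are below) =====
def Claim_equal_check_and_adjust_list_length : Prop := ∀ (ref_list : List Int) (adj_list : List Int), Dom_check_and_adjust_list_length ref_list adj_list → Pre_check_and_adjust_list_length ref_list adj_list → Spec_check_and_adjust_list_length ref_list adj_list (check_and_adjust_list_length ref_list adj_list)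

-- ===== LEMMAS AND PROOFS =====

-- elements of the flattened repetition cycle through L
theorem pvFlatRep_getElem (L : List Int) (hm : 0 < L.length) :
    ∀ (r j : Nat) (h : j < ((List.replicate r L).flatten).length),
      ((List.replicate r L).flatten)[j] = L[j % L.length]'(Nat.mod_lt _ hm) := by
  intro r
  induction r with
  | zero => intro j h; simp at h
  | succ r ih =>
    intro j h
    have heq : (List.replicate (r + 1) L).flatten = L ++ (List.replicate r L).flatten := by
      simp [List.replicate_succ]
    have h' : j < (L ++ (List.replicate r L).flatten).length := by rw [← heq]; exact h
    rw [List.getElem_of_eq heq, List.getElem_append]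
    by_cases hj : j < L.length
    · rw [dif_pos hj]
      congr 1
      exact (Nat.mod_eq_of_lt hj).symm
    · rw [dif_neg hj]
      have hlen : j - L.length < ((List.replicate r L).flatten).length := by
        rw [List.length_append] at h'; omega
      rw [ih _ hlen]
      congr 1
      conv_rhs => rw [show j = L.length + (j - L.length) from by omega]
      rw [Nat.add_mod_left]

-- the loop invariant: any current list whose elements cycle through adj, with
-- idx = cur.length - adj.length, is driven by pvLoopA to the (unique) list t of
-- length n whose elements cycle through adj
theorem pvLoopA_eq (adj : List Int) (n : Nat) (hm : 0 < adj.length)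
    (t : List Int) (htlen : t.length = n)
    (ht : ∀ (j : Nat) (hj : j < t.length), t[j] = adj[j % adj.length]'(Nat.mod_lt _ hm))
    (cur : List Int) (idx : Nat)
    (hmc : adj.length ≤ cur.length) (hcn : cur.length ≤ n)
    (hidx : idx = cur.length - adj.length)
    (hinv : ∀ (j : Nat) (hj : j < cur.length), cur[j] = adj[j % adj.length]'(Nat.mod_lt _ hm)) :
    pvLoopA n cur idx = t := by
  rw [pvLoopA]
  by_cases hlt : cur.length < n
  · rw [dif_pos hlt]
    have hidxlt : idx < cur.length := by omega
    rw [PySem.List.pyGet?_natCast, List.getElem?_eq_getElem hidxlt]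
    have hstep : ∀ (j : Nat) (hj : j < (cur ++ [cur[idx]]).length),
        (cur ++ [cur[idx]])[j] = adj[j % adj.length]'(Nat.mod_lt _ hm) := by
      intro j hj
      rw [List.getElem_append]
      by_cases hjc : j < cur.length
      · rw [dif_pos hjc]; exact hinv j hjc
      · rw [dif_neg hjc]
        have hje : j = cur.length := by
          rw [List.length_append, List.length_singleton] at hj; omega
        rw [List.getElem_singleton, hinv idx hidxlt]
        congr 1
        rw [hje, hidx]
        conv_rhs => rw [show cur.length = adj.length + (cur.length - adj.length) from by omega]
        rw [Nat.add_mod_left]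
    exact pvLoopA_eq adj n hm t htlen ht (cur ++ [cur[idx]]) (idx + 1)
      (by rw [List.length_append]; omega) (by rw [List.length_append, List.length_singleton]; omega)
      (by rw [List.length_append, List.length_singleton]; omega) hstep
  · rw [dif_neg hlt]
    apply List.ext_getElem (by omega)
    intro i h1 h2
    rw [hinv i h1, ht i h2]
termination_by n - cur.length
decreasing_by rw [List.length_append, List.length_singleton]; omega

-- ceil division: n ≤ reps * m for reps = -((-n) fdiv m), 0 < m ≤ n (as naturals)
theorem pvReps_ge (n m : Nat) (hm : 0 < m) (hmn : m ≤ n) :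
    n ≤ (-(PySem.Int.floordiv (-(n : Int)) (m : Int))).toNat * m := by
  unfold PySem.Int.floordiv
  have hfd : (-(n : Int)).fdiv (m : Int) = (-(n : Int)) / (m : Int) := by
    rw [Int.fdiv_eq_ediv]
    simp
  rw [hfd]
  have h1 := Int.mul_ediv_add_emod (-(n : Int)) (m : Int)
  have h2 := Int.emod_nonneg (-(n : Int)) (b := (m : Int)) (by positivity)
  set q := (-(n : Int)) / (m : Int) with hq
  have hqn : 0 ≤ -q := by nlinarith [Int.natCast_nonneg n, Int.natCast_pos.mpr hm]
  have key : (n : Int) ≤ (-q) * (m : Int) := by nlinarith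
  have : ((-q).toNat : Int) = -q := Int.toNat_of_nonneg hqn
  zify
  calc (n : Int) ≤ (-q) * (m : Int) := key
    _ = ((-q).toNat : Int) * (m : Int) := by rw [this]

-- ===== VERDICT (by name: the statement is the Claim_ definition above) =====
theorem check_and_adjust_list_length_spec : Claim_equal_check_and_adjust_list_length := by
  intro ref_list adj_list _hdom hpre
  obtain ⟨hr, ha⟩ := hpre
  unfold Spec_check_and_adjust_list_length check_and_adjust_list_length check_and_adjust_list_length_alt
  split_ifs with hP hlt
  · dsimp only
    rw [if_pos hlt]
  · dsimp only
    rw [if_neg hlt]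
    have hmn : adj_list.length ≤ ref_list.length := Nat.le_of_not_lt hlt
    have hge := pvReps_ge ref_list.length adj_list.length ha hmn
    unfold PySem.List.pyRepeat
    rw [PySem.List.slice_to_natCast]
    have hflen : ∀ k : Nat, ((List.replicate k adj_list).flatten).length = k * adj_list.length := by
      intro k; simp
    apply pvLoopA_eq adj_list ref_list.length ha _ ?_ ?_ adj_list 0 (Nat.le_refl _) hmn (by omega) ?_
    · rw [List.length_take, hflen]; omega
    · intro j hj
      rw [List.length_take, hflen] at hj
      rw [List.getElem_take]
      exact pvFlatRep_getElem adj_list ha _ j (by rw [hflen]; omega)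
    · intro j hj
      congr 1
      exact (Nat.mod_eq_of_lt hj).symm
  · rfl
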